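-- pv_equiv track=rewrite | github.com/calclavia/tal-asrd | tal/baseline/reconcile.py | get_relative_ids
-- ===== SOURCE A (Python) =====
-- def get_relative_ids(speakers):
--     all_speakers = []
--     ids = []
--     for s in speakers:
--         try:
--             spk_id = all_speakers.index(s)
--         except:
--             spk_id = len(all_speakers)
--             all_speakers.append(s)
--         ids.append(spk_id)
--     return ids, all_speakers
-- ===== SOURCE B (Python) =====
-- def get_relative_ids(speakers):
--     # distinct speakers, ordered by first appearance via a sort keyed on first index
--     all_speakers = sorted(set(speakers), key=speakers.index)
--     rank = {s: r for r, s in enumerate(all_speakers)}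
--     return [rank[s] for s in speakers], all_speakers
-- ===== Notes on version B (the rewrite author's own statement) =====
-- stated objective: alternative
-- what changed: A builds the speaker table and the ids in one interleaved scan (list.index with a try/except append per element); B first constructs the table in one shot as sorted(set(speakers), key=speakers.index) - dedupe by set, recover first-appearance order by sorting on first index - then derives the ids from an enumerate-built rank dict in a separate pass.
import Mathlib
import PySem

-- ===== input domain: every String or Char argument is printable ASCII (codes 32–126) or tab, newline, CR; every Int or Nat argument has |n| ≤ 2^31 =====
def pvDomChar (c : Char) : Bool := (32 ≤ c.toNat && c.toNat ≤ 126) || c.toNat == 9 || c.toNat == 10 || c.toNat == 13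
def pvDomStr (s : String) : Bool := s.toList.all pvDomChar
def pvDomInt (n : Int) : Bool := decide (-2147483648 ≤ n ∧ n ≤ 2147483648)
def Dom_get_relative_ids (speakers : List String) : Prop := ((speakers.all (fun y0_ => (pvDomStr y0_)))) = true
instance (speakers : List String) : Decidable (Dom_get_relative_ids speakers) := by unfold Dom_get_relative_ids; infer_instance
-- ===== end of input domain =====

-- B replaces A's incremental scan (list.index with a try/except append per element) by a
-- set-then-sort construction of the speaker table (sorted(set(speakers), key=speakers.index))
-- followed by a rank-dict lookup pass: a genuinely different, sort-based algorithm of similar cost.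


-- ===== PORT A =====
-- A's loop: try all_speakers.index(s) (ValueError branch appends), push the id.
def pvALoop : List String → List String → List Int → List Int × List String
  | [], all_speakers, ids => (ids, all_speakers)
  | s :: rest, all_speakers, ids =>
    match PySem.List.index? all_speakers s with
    | some i => pvALoop rest all_speakers (ids ++ [(i : Int)])
    | none => pvALoop rest (all_speakers ++ [s]) (ids ++ [(all_speakers.length : Int)])

def get_relative_ids (speakers : List String) : List Int × List String :=
  pvALoop speakers [] []

-- ===== PORT B =====
-- Source B line 1: all_speakers = sorted(set(speakers), key=speakers.index).
-- speakers.index(s) is ported as speakers.idxOf s: every s handed to the key comes from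
-- set(speakers), so it is in speakers and .index never raises (idxOf = that first index).
-- Source B line 2: rank = {s: r for r, s in enumerate(all_speakers)}.
-- Source B line 3: rank[s] never raises (s ∈ all_speakers), ported as getD with an unused default.
def get_relative_ids_alt (speakers : List String) : List Int × List String :=
  let all_speakers := PySem.List.sorted (PySem.Set.ofList speakers)
      (fun s => (speakers.idxOf s : Int))
  let rank := (PySem.List.enumerate all_speakers).foldl
      (fun d p => d.insert p.2 p.1) PySem.Dict.empty
  (speakers.map (fun s => rank.getD s 0), all_speakers)

-- ===== PRECONDITION & SPEC =====
def Spec_get_relative_ids (speakers : List String) (out : List Int × List String) : Prop := out = get_relative_ids_alt speakers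
instance (speakers : List String) (out : List Int × List String) : Decidable (Spec_get_relative_ids speakers out) := by unfold Spec_get_relative_ids; infer_instance

-- ===== CLAIM (what is proved, stated in full; the proofs are below) =====
def Claim_equal_get_relative_ids : Prop := ∀ (speakers : List String), Dom_get_relative_ids speakers → Spec_get_relative_ids speakers (get_relative_ids speakers)

-- ===== LEMMAS AND PROOFS =====

/-- The evolution of A's `all_speakers` list alone. -/
def pvAll : List String → List String → List String
  | [], all => all
  | s :: rest, all => if s ∈ all then pvAll rest all else pvAll rest (all ++ [s])

theorem pvAll_extends (rest : List String) (all : List String) :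
    ∃ t, pvAll rest all = all ++ t := by
  induction rest generalizing all with
  | nil => exact ⟨[], by simp [pvAll]⟩
  | cons s rest ih =>
    by_cases h : s ∈ all
    · simpa [pvAll, h] using ih all
    · obtain ⟨t, ht⟩ := ih (all ++ [s])
      exact ⟨[s] ++ t, by simp [pvAll, h, ht]⟩

/-- An index found in an intermediate `all_speakers` survives to the final one. -/
theorem index?_pvAll_of_some {all : List String} {s : String} {i : ℕ}
    (rest : List String) (h : PySem.List.index? all s = some i) :
    PySem.List.index? (pvAll rest all) s = some i := by
  have hmem : s ∈ all := (PySem.List.index?_isSome_iff all s).1 (by rw [h]; rfl)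
  obtain ⟨t, ht⟩ := pvAll_extends rest all
  rw [ht, PySem.List.index?_append_of_mem t hmem]
  exact h

/-- Closed form of A's loop: ids are lookups in the FINAL speaker table. -/
theorem pvALoop_spec (rest : List String) (all : List String) (ids : List Int) :
    pvALoop rest all ids =
      (ids ++ rest.map (fun s =>
         ((PySem.List.index? (pvAll rest all) s).map (fun n => (n : Int))).getD 0),
       pvAll rest all) := by
  induction rest generalizing all ids with
  | nil => simp [pvALoop, pvAll]
  | cons s rest ih =>
    cases h : PySem.List.index? all s with
    | some i =>
      have hmem : s ∈ all := (PySem.List.index?_isSome_iff all s).1 (by rw [h]; rfl)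
      have hfin : PySem.List.index? (pvAll rest all) s = some i := index?_pvAll_of_some rest h
      rw [PySem.List.index?_eq_idxOf?] at h hfin
      simp [pvALoop, pvAll, h, hmem, ih, hfin]
    | none =>
      have hmem : s ∉ all := (PySem.List.index?_eq_none_iff all s).1 h
      have hself : PySem.List.index? (all ++ [s]) s = some all.length :=
        PySem.List.index?_append_singleton_self all s hmem
      have hfin : PySem.List.index? (pvAll rest (all ++ [s])) s = some all.length :=
        index?_pvAll_of_some rest hself
      rw [PySem.List.index?_eq_idxOf?] at h hfin
      simp [pvALoop, pvAll, h, hmem, ih, hfin]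

/-- A's table IS the fold of `Set.add`, i.e. `set(...)`'s first-occurrence order. -/
theorem pvAll_eq_update (rest : List String) (all : List String) :
    pvAll rest all = PySem.Set.update all rest := by
  induction rest generalizing all with
  | nil => simp [pvAll, PySem.Set.update]
  | cons s rest ih =>
    by_cases h : s ∈ all
    · have hadd : PySem.Set.add all s = all := by
        simp [PySem.Set.add, PySem.Set.contains, h]
      rw [pvAll, if_pos h, PySem.Set.update, List.foldl_cons, hadd, ih]
      rfl
    · have hadd : PySem.Set.add all s = all ++ [s] := by
        simp [PySem.Set.add, PySem.Set.contains, h]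
      rw [pvAll, if_neg h, PySem.Set.update, List.foldl_cons, hadd, ih]
      rfl

theorem pvAll_eq_ofList (speakers : List String) :
    pvAll speakers [] = PySem.Set.ofList speakers := by
  rw [pvAll_eq_update, PySem.Set.ofList_eq_foldl]
  rfl

/-- A's table lists speakers in strictly increasing order of first appearance. -/
theorem pvAll_pairwise (speakers : List String) : ∀ (rest pre all : List String),
    pre ++ rest = speakers → (∀ a, a ∈ all ↔ a ∈ pre) →
    all.Pairwise (fun a b => (speakers.idxOf a : Int) < (speakers.idxOf b : Int)) →
    (pvAll rest all).Pairwise (fun a b => (speakers.idxOf a : Int) < (speakers.idxOf b : Int)) := by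
  intro rest
  induction rest with
  | nil => intro pre all _ _ hp; simpa [pvAll] using hp
  | cons s rest ih =>
    intro pre all hsplit hmem hp
    by_cases h : s ∈ all
    · rw [pvAll, if_pos h]
      refine ih (pre ++ [s]) all (by simpa using hsplit) ?_ hp
      intro a
      rw [hmem a]
      constructor
      · intro ha; exact List.mem_append_left _ ha
      · intro ha
        rcases List.mem_append.1 ha with ha | ha
        · exact ha
        · simp only [List.mem_singleton] at ha
          subst ha; exact (hmem a).1 h
    · rw [pvAll, if_neg h]
      refine ih (pre ++ [s]) (all ++ [s]) (by simpa using hsplit) ?_ ?_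
      · intro a; simp [hmem a]
      · rw [List.pairwise_append]
        refine ⟨hp, by simp, ?_⟩
        intro a ha b hb
        simp only [List.mem_singleton] at hb
        rw [hb]
        have hapre : a ∈ pre := (hmem a).1 ha
        have hspre : s ∉ pre := fun hs => h ((hmem s).2 hs)
        have h1 : speakers.idxOf a < pre.length := by
          rw [← hsplit, List.idxOf_append, if_pos hapre]
          exact List.idxOf_lt_length_of_mem hapre
        have h2 : pre.length ≤ speakers.idxOf s := by
          rw [← hsplit, List.idxOf_append, if_neg hspre]
          omega
        exact_mod_cast h1.trans_le h2

/-- PySem.List.index? of a present element is its idxOf. -/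
theorem index?_of_mem (l : List String) (s : String) (h : s ∈ l) :
    PySem.List.index? l s = some (l.idxOf s) := by
  induction l with
  | nil => cases h
  | cons x l ih =>
    by_cases hx : x = s
    · subst hx
      rw [PySem.List.index?_cons_self]
      simp [List.idxOf_cons_self]
    · have hs : s ∈ l := by
        rcases List.mem_cons.1 h with h' | h'
        · exact absurd h'.symm hx
        · exact h'
      rw [PySem.List.index?_cons_of_ne l hx, ih hs]
      simp [hx]

/-- B's rank dict: a fold over enumerate leaves absent keys alone … -/
theorem rank_get?_not_mem (l : List String) : ∀ (n : Int) (d : PySem.Dict String Int)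
    (s : String), s ∉ l →
    ((PySem.List.enumerate l n).foldl (fun d p => d.insert p.2 p.1) d).get? s = d.get? s := by
  induction l with
  | nil => intro n d s _; simp [PySem.List.enumerate_nil]
  | cons x l ih =>
    intro n d s hs
    rw [PySem.List.enumerate_cons, List.foldl_cons]
    rw [ih (n + 1) _ s (fun h => hs (List.mem_cons_of_mem _ h))]
    rw [PySem.Dict.get?_insert]
    rw [if_neg (fun h => hs (by simp [h]))]

/-- … and maps a present key (keys distinct) to start + its first index. -/
theorem rank_get?_mem (l : List String) : ∀ (n : Int) (d : PySem.Dict String Int)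
    (s : String), l.Nodup → s ∈ l →
    ((PySem.List.enumerate l n).foldl (fun d p => d.insert p.2 p.1) d).get? s
      = some (n + (l.idxOf s : Int)) := by
  induction l with
  | nil => intro _ _ _ _ h; cases h
  | cons x l ih =>
    intro n d s hnd hs
    rw [PySem.List.enumerate_cons, List.foldl_cons]
    by_cases hx : s = x
    · subst hx
      have hnotl : s ∉ l := (List.nodup_cons.1 hnd).1
      rw [rank_get?_not_mem l (n + 1) _ s hnotl, PySem.Dict.get?_insert, if_pos rfl]
      simp [List.idxOf_cons_self]
    · have hs' : s ∈ l := by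
        rcases List.mem_cons.1 hs with h' | h'
        · exact absurd h' hx
        · exact h'
      rw [ih (n + 1) _ s (List.nodup_cons.1 hnd).2 hs']
      have hxs : x ≠ s := fun h => hx h.symm
      simp [hxs]
      ring

-- ===== VERDICT (by name: the statement is the Claim_ definition above) =====
theorem get_relative_ids_spec : Claim_equal_get_relative_ids := by
  intro speakers _
  unfold Spec_get_relative_ids get_relative_ids get_relative_ids_alt
  rw [pvALoop_spec]
  have hofl : pvAll speakers [] = PySem.Set.ofList speakers := pvAll_eq_ofList speakers
  have hpair := pvAll_pairwise speakers speakers [] [] rfl (by simp) (by simp)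
  have hsorted : PySem.List.sorted (PySem.Set.ofList speakers)
      (fun s => (speakers.idxOf s : Int)) = pvAll speakers [] :=
    PySem.List.sorted_eq_of_perm_of_pairwise_lt _ _ _ (hofl ▸ List.Perm.refl _) hpair
  have hnd : (pvAll speakers []).Nodup := by
    rw [hofl]; exact PySem.Set.nodup_ofList speakers
  refine Prod.ext ?_ (by simp [hsorted])
  simp only [hsorted, List.nil_append]
  refine (List.map_congr_left ?_).symm
  intro s hs
  have hmem : s ∈ pvAll speakers [] := by
    rw [hofl]; exact (PySem.Set.mem_ofList speakers s).2 hs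
  rw [PySem.Dict.getD_eq_get?_getD,
    rank_get?_mem (pvAll speakers []) 0 PySem.Dict.empty s hnd hmem,
    index?_of_mem (pvAll speakers []) s hmem]
  simp
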